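-- pv_equiv track=rewrite | github.com/nikelsj11/Studying | PyDrops/sorting/shell_sort.py | sedgwick_increment
-- ===== SOURCE A (Python) =====
-- def sedgwick_increment(length):
--     """
--     Последовательность Седжвика.
--
--     -length - необходимое количество членов последовательности.
--
--     ~На выход список последовательности длин приращения.
--     """
--     kof1 = kof2 = kof3 = 1
--     increment = -1
--     func_value = []
--     while 1:
--         increment += 1
--         if increment % 2:
--             func_value.append(8*kof1 - 6*kof2 + 1)
--         else:
--             func_value.append(9*kof1 - 9*kof3 + 1)
--             kof2 *= 2
--             kof3 *= 2
--         kof1 *= 2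
--         if 3*func_value[increment] > length:
--             return func_value[:-1]
-- ===== SOURCE B (Python) =====
-- def sedgwick_increment(length):
--     """Staged computation: pre-generate the terms two at a time (one pair of
--     closed forms per step, no parity branch), then keep the prefix whose
--     terms t satisfy 3*t <= length."""
--     terms = []
--     p = q = 1            # p = 4**i, q = 2**i
--     for _ in range(32):  # 64 candidate terms, far beyond any 32-bit length
--         terms.append(9 * (p - q) + 1)       # term at index 2i
--         terms.append(16 * p - 12 * q + 1)   # term at index 2i + 1
--         p *= 4
--         q *= 2
--     out = []
--     for t in terms:
--         if 3 * t > length: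
--             break
--         out.append(t)
--     return out
-- ===== Notes on version B (the rewrite author's own statement) =====
-- stated objective: alternative
-- what changed: Replaces A's single parity-branching loop with three running accumulators and append-then-truncate return by a staged computation: first pre-generate candidate terms two at a time from one pair of closed forms (no parity branch), then keep the prefix of terms under the threshold.
import Mathlib
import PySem

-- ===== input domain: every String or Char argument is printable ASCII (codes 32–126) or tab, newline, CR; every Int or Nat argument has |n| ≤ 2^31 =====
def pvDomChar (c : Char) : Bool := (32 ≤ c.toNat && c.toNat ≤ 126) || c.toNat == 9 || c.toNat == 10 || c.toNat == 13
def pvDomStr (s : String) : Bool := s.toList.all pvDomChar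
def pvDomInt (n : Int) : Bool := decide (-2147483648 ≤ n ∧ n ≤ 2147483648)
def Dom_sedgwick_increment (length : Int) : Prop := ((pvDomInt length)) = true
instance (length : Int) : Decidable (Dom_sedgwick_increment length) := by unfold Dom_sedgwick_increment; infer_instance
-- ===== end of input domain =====

-- B replaces A's parity-branching accumulator loop by a staged computation:
-- pre-generate the terms two at a time, then keep the qualifying prefix.

-- ===== PORT A =====
-- A's `while 1` loop; the fuel bound (64) is only a totality guard: on the domain
-- (|length| ≤ 2^31) the loop exits long before the fuel runs out.
def sedgwick_increment_loop (length kof1 kof2 kof3 inc : Int) (fv : List Int) : Nat → List Int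
  | 0 => fv
  | fuel + 1 =>
    let inc' := inc + 1
    if inc' % 2 ≠ 0 then
      let t := 8 * kof1 - 6 * kof2 + 1
      let fv' := fv ++ [t]
      if 3 * t > length then fv'.dropLast
      else sedgwick_increment_loop length (kof1 * 2) kof2 kof3 inc' fv' fuel
    else
      let t := 9 * kof1 - 9 * kof3 + 1
      let fv' := fv ++ [t]
      if 3 * t > length then fv'.dropLast
      else sedgwick_increment_loop length (kof1 * 2) (kof2 * 2) (kof3 * 2) inc' fv' fuel

def sedgwick_increment (length : Int) : List Int :=
  sedgwick_increment_loop length 1 1 1 (-1) [] 64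

-- ===== PORT B =====
-- Source B's first stage: `for _ in range(32)` appending two closed-form terms per step.
def pvTerms (p q : Int) : Nat → List Int
  | 0 => []
  | n + 1 => (9 * (p - q) + 1) :: (16 * p - 12 * q + 1) :: pvTerms (p * 4) (q * 2) n

-- Source B's second stage: the `for t in terms: if 3*t > length: break; out.append(t)` loop.
def pvTake (length : Int) : List Int → List Int
  | [] => []
  | t :: rest => if 3 * t > length then [] else t :: pvTake length rest

def sedgwick_increment_alt (length : Int) : List Int :=
  pvTake length (pvTerms 1 1 32)

-- ===== PRECONDITION & SPEC =====
def Spec_sedgwick_increment (length : Int) (out : List Int) : Prop := out = sedgwick_increment_alt length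
instance (length : Int) (out : List Int) : Decidable (Spec_sedgwick_increment length out) := by unfold Spec_sedgwick_increment; infer_instance

-- ===== CLAIM (what is proved, stated in full; the proofs are below) =====
def Claim_equal_sedgwick_increment : Prop := ∀ (length : Int), Dom_sedgwick_increment length → Spec_sedgwick_increment length (sedgwick_increment length)

-- ===== LEMMAS AND PROOFS =====

-- Invariant: two steps of A's loop (an even/odd pair, with kof1 = 2^(2i),
-- kof2 = kof3 = 2^i, increment = 2i - 1) match one pair of B's pre-generated
-- terms; holds for every fuel, so no bound on `length` is needed.
theorem sedgwick_pairs_eq (n : Nat) : ∀ (length : Int) (i : Nat) (acc : List Int),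
    sedgwick_increment_loop length (2 ^ (2 * i)) (2 ^ i) (2 ^ i) (2 * (i : Int) - 1) acc (2 * n)
      = acc ++ pvTake length (pvTerms (2 ^ (2 * i)) (2 ^ i) n) := by
  induction n with
  | zero => intro length i acc; simp [pvTerms, pvTake, sedgwick_increment_loop]
  | succ n ih =>
    intro length i acc
    have hfuel : 2 * (n + 1) = (2 * n) + 1 + 1 := by omega
    rw [hfuel]
    have hevenc : ¬ ((2 * (i : Int) - 1 + 1) % 2 ≠ 0) := by omega
    have hoddc : (2 * (i : Int) - 1 + 1 + 1) % 2 ≠ 0 := by omega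
    have hE : 9 * (2 : Int) ^ (2 * i) - 9 * 2 ^ i + 1 = 9 * ((2 : Int) ^ (2 * i) - 2 ^ i) + 1 := by ring
    have hO : 8 * ((2 : Int) ^ (2 * i) * 2) - 6 * (2 ^ i * 2) + 1
        = 16 * (2 : Int) ^ (2 * i) - 12 * 2 ^ i + 1 := by ring
    simp only [sedgwick_increment_loop, pvTerms, pvTake, if_neg hevenc, hE]
    by_cases h1 : 3 * (9 * ((2:Int) ^ (2*i) - 2 ^ i) + 1) > length
    · simp [h1]
    · simp only [if_neg h1, if_pos hoddc, hO]
      by_cases h2 : 3 * (16 * (2:Int) ^ (2 * i) - 12 * 2 ^ i + 1) > length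
      · simp [h2]
      · simp only [if_neg h2]
        have hexp : 2 * (i + 1) = 2 * i + 1 + 1 := by omega
        have e1 : (2 : Int) ^ (2 * i) * 2 * 2 = 2 ^ (2 * (i + 1)) := by
          rw [hexp, pow_succ, pow_succ]
        have e2 : (2 : Int) ^ i * 2 = 2 ^ (i + 1) := by rw [← pow_succ]
        have e3 : 2 * (i : Int) - 1 + 1 + 1 = 2 * ((i + 1 : Nat) : Int) - 1 := by push_cast; ring
        have e4 : (2 : Int) ^ (2 * i) * 4 = 2 ^ (2 * (i + 1)) := by
          rw [hexp, pow_succ, pow_succ]; ring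
        rw [e1, e2, e3, e4, ih]
        simp

-- ===== VERDICT (by name: the statement is the Claim_ definition above) =====
theorem sedgwick_increment_spec : Claim_equal_sedgwick_increment := by
  intro length _
  unfold Spec_sedgwick_increment sedgwick_increment sedgwick_increment_alt
  have := sedgwick_pairs_eq 32 length 0 []
  simpa using this
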